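-- pv_equiv track=rewrite | github.com/kytranl2/yeetcode | yeetcode/updatePrioritiesProcesses/updatePriorities.py | update_priorities
-- ===== SOURCE A (Python) =====
-- def update_priorities(processes):
--     from collections import deque, defaultdict
--     from math import floor
--
--     # Initialize the queue and the dictionary for priority counts
--     process_queue = deque(processes)
--     priority_count = defaultdict(int)
--     for p in processes:
--         priority_count[p] += 1
--
--     while True:
--         # Find the highest priority that is shared by at least two processes
--         bp = 0
--         for priority in sorted(priority_count.keys(), reverse=True):
--             if priority_count[priority] > 1:
--                 bp = priority
--                 break
--
--         # Terminate if no such priority exists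
--         if bp == 0:
--             break
--
--         # Execute process 1 and update priority of process 2
--         first_index = next(i for i, p in enumerate(process_queue) if p == bp)
--         second_index = next(i for i, p in enumerate(process_queue) if p == bp and i != first_index)
--
--         # Remove process 1
--         process_queue[first_index] = None
--         priority_count[bp] -= 1
--         # Update priority of process 2
--         new_priority = floor(bp / 2)
--         process_queue[second_index] = new_priority
--         priority_count[new_priority] += 1
--         priority_count[bp] -= 1
--
--         # Clean up the queue and priority count dictionary
--         process_queue = deque(p for p in process_queue if p is not None)
--         if priority_count[bp] == 0:
--             del priority_count[bp]
--
--     return list(process_queue)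
-- ===== SOURCE B (Python) =====
-- def update_priorities(processes):
--     # Keep one list of (-priority, original_position) pairs, maintained in sorted
--     # (tuple-lexicographic) order: highest priority first, ties by position.
--     # Duplicated priorities are then ADJACENT, and the first adjacent equal pair
--     # is exactly the highest duplicated priority with its two earliest positions.
--     pairs = []
--     for i, p in enumerate(processes):
--         _ins(pairs, (-p, i))
--     while True:
--         k = -1
--         for j in range(len(pairs) - 1):
--             if pairs[j][0] == pairs[j + 1][0]:
--                 k = j
--                 break
--         if k < 0 or pairs[k][0] == 0:
--             break
--         merged = (-((-pairs[k][0]) // 2), pairs[k + 1][1])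
--         pairs = pairs[:k] + pairs[k + 2:]
--         _ins(pairs, merged)
--     # Single final build: restore original relative order via the positions.
--     bypos = []
--     for np, i in pairs:
--         _ins(bypos, (i, -np))
--     return [v for _, v in bypos]
--
--
-- def _ins(sorted_pairs, item):
--     # insert item before the first element not smaller than it (ordered insert)
--     lo = 0
--     while lo < len(sorted_pairs) and sorted_pairs[lo] < item:
--         lo += 1
--     sorted_pairs.insert(lo, item)
-- ===== Notes on version B (the rewrite author's own statement) =====
-- stated objective: alternative
-- what changed: B replaces A's queue + priority-count dict + per-round full key sort by a single lexicographically sorted list of (-priority, original position) pairs: the highest duplicated priority with its two earliest positions is exactly the first adjacent equal pair of that list, a merge is two deletions plus one ordered insert, and the output is rebuilt once at the end from the stored positions.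
import Mathlib
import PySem

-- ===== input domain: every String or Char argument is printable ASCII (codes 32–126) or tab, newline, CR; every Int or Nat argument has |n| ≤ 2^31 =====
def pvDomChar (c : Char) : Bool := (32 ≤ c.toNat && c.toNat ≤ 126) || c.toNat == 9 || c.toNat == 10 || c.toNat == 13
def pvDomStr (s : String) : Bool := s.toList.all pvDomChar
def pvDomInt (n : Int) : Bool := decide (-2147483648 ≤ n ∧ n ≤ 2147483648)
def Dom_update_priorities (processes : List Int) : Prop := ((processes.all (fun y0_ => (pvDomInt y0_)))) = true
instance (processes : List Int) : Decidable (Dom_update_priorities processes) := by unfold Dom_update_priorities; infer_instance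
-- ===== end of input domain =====

-- B replaces A's queue + count-dict + per-round key sort by ONE lexicographically sorted list of
-- (-priority, original position) pairs: the merge pair is the first adjacent equal pair, and the
-- output is rebuilt once at the end from the stored positions (alternative algorithm, not faster).

-- ===== PORT A =====
-- One iteration of A's 'while True' loop; fuel only makes the recursion structural
-- (each iteration that merges removes one queue element, so length+1 fuel is never exhausted).
def updLoopA (fuel : Nat) (q : List Int) (d : PySem.Dict Int Int) : List Int :=
  match fuel with
  | 0 => q
  | fuel + 1 =>
    -- bp = 0; for priority in sorted(priority_count.keys(), reverse=True): if count > 1: bp = priority; break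
    let bp : Int :=
      match (PySem.List.sorted d.keys (fun k => k) true).find? (fun k => decide (1 < d.getD k 0)) with
      | some k => k
      | none => 0
    if bp == 0 then q
    else
      -- first_index = next(i for i, p in enumerate(process_queue) if p == bp)
      match (PySem.List.enumerate q 0).find? (fun p => p.2 == bp) with
      | none => q   -- unreachable (next() would raise StopIteration); totality guard
      | some fst =>
        -- second_index = next(i for i, p in enumerate(process_queue) if p == bp and i != first_index)
        match (PySem.List.enumerate q 0).find? (fun p => p.2 == bp && !(p.1 == fst.1)) with
        | none => q   -- unreachable; totality guard
        | some snd =>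
          -- process_queue[first_index] = None
          let qo := (q.map some).set fst.1.toNat none
          -- priority_count[bp] -= 1
          let d1 := d.modify bp 0 (fun v => v - 1)
          -- new_priority = floor(bp / 2): equals floor division bp // 2 exactly on the |n| ≤ 2^31 domain
          let np := PySem.Int.floordiv bp 2
          -- process_queue[second_index] = new_priority
          let qo2 := qo.set snd.1.toNat (some np)
          -- priority_count[new_priority] += 1 ; priority_count[bp] -= 1
          let d2 := d1.modify np 0 (fun v => v + 1)
          let d3 := d2.modify bp 0 (fun v => v - 1)
          -- process_queue = deque(p for p in process_queue if p is not None)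
          let q' := qo2.filterMap id
          -- if priority_count[bp] == 0: del priority_count[bp]
          let d4 := if d3.getD bp 0 = 0 then d3.erase bp else d3
          updLoopA fuel q' d4

def update_priorities (processes : List Int) : List Int :=
  -- priority_count = defaultdict(int); for p in processes: priority_count[p] += 1
  let d := processes.foldl (fun d p => d.modify p 0 (fun v => v + 1)) PySem.Dict.empty
  updLoopA (processes.length + 1) processes d

-- ===== PORT B =====
-- Python tuple '<' on the (-priority, position) pairs (lexicographic)
def lexLt (a b : Int × Int) : Bool := a.1 < b.1 || (a.1 == b.1 && a.2 < b.2)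

-- _ins: 'lo = 0; while lo < len and pairs[lo] < item: lo += 1; pairs.insert(lo, item)'
def insPair : List (Int × Int) → (Int × Int) → List (Int × Int)
  | [], it => [it]
  | x :: xs, it => if lexLt x it then x :: insPair xs it else it :: x :: xs

-- 'k = -1; for j in range(len(pairs)-1): if pairs[j][0] == pairs[j+1][0]: k = j; break' (none = k < 0)
def findAdj : List (Int × Int) → Option Nat
  | [] => none
  | [_] => none
  | x :: y :: xs => if x.1 == y.1 then some 0 else (findAdj (y :: xs)).map (· + 1)

-- final build: 'for np, i in pairs: _ins(bypos, (i, -np)); return [v for _, v in bypos]'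
def buildB (pairs : List (Int × Int)) : List Int :=
  (pairs.foldl (fun acc t => insPair acc (t.2, -t.1)) []).map Prod.snd

-- One iteration of B's 'while True' loop; fuel only makes the recursion structural.
def updLoopB (fuel : Nat) (pairs : List (Int × Int)) : List (Int × Int) :=
  match fuel with
  | 0 => pairs
  | fuel + 1 =>
    match findAdj pairs with
    | none => pairs            -- 'if k < 0 … : break'
    | some k =>
      -- pairs[k] / pairs[k+1]: indices are valid whenever findAdj returns some; default is a totality guard
      let pk := pairs.getD k (0, 0)
      let pk1 := pairs.getD (k + 1) (0, 0)
      if pk.1 == 0 then pairs  -- '… or pairs[k][0] == 0: break'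
      else
        -- merged = (-((-pairs[k][0]) // 2), pairs[k+1][1]); pairs = pairs[:k] + pairs[k+2:]; _ins(pairs, merged)
        let merged := (-(PySem.Int.floordiv (-pk.1) 2), pk1.2)
        updLoopB fuel (insPair (pairs.take k ++ pairs.drop (k + 2)) merged)

def update_priorities_alt (processes : List Int) : List Int :=
  -- 'pairs = []; for i, p in enumerate(processes): _ins(pairs, (-p, i))'
  let pairs := (PySem.List.enumerate processes 0).foldl (fun acc t => insPair acc (-t.2, t.1)) []
  buildB (updLoopB (processes.length + 1) pairs)

-- ===== PRECONDITION & SPEC =====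
def Spec_update_priorities (processes : List Int) (out : List Int) : Prop := out = update_priorities_alt processes
instance (processes : List Int) (out : List Int) : Decidable (Spec_update_priorities processes out) := by unfold Spec_update_priorities; infer_instance

-- ===== CLAIM (what is proved, stated in full; the proofs are below) =====
def Claim_equal_update_priorities : Prop := ∀ (processes : List Int), Dom_update_priorities processes → Spec_update_priorities processes (update_priorities processes)

-- ===== LEMMAS AND PROOFS =====

-- ---- generic facts about lexLt / insPair ----
def lexLe (a b : Int × Int) : Prop := lexLt b a = false

theorem lexLt_iff (a b : Int × Int) : lexLt a b = true ↔ (a.1 < b.1 ∨ (a.1 = b.1 ∧ a.2 < b.2)) := by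
  simp [lexLt]

theorem lexLe_iff (a b : Int × Int) : lexLe a b ↔ (a.1 < b.1 ∨ (a.1 = b.1 ∧ a.2 ≤ b.2)) := by
  unfold lexLe
  rw [← Bool.not_eq_true, not_iff_comm, lexLt_iff]
  constructor <;> intro h <;> omega

theorem lexLe_refl (a : Int × Int) : lexLe a a := by
  rw [lexLe_iff]
  omega

theorem lexLe_antisymm {a b : Int × Int} (h1 : lexLe a b) (h2 : lexLe b a) : a = b := by
  rw [lexLe_iff] at h1 h2
  have e1 : a.1 = b.1 := by omega
  have e2 : a.2 = b.2 := by omega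
  exact Prod.ext e1 e2

theorem lexLe_trans {a b c : Int × Int} (h1 : lexLe a b) (h2 : lexLe b c) : lexLe a c := by
  rw [lexLe_iff] at *
  omega

theorem lexLe_of_lt {a b : Int × Int} (h : lexLt a b = true) : lexLe a b := by
  rw [lexLt_iff] at h
  rw [lexLe_iff]
  omega

theorem mem_insPair (xs : List (Int × Int)) (it y : Int × Int) :
    y ∈ insPair xs it ↔ y = it ∨ y ∈ xs := by
  induction xs with
  | nil => simp [insPair]
  | cons x xs ih =>
    by_cases h : lexLt x it
    · simp only [insPair, h, if_pos, List.mem_cons, ih]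
      tauto
    · simp only [insPair, h, Bool.false_eq_true, if_false, List.mem_cons]

theorem insPair_perm (xs : List (Int × Int)) (it : Int × Int) :
    (insPair xs it).Perm (it :: xs) := by
  induction xs with
  | nil => simp [insPair]
  | cons x xs ih =>
    by_cases h : lexLt x it
    · simp only [insPair, h, if_pos]
      exact (ih.cons x).trans (List.Perm.swap it x xs)
    · simp [insPair, h]

theorem pairwise_insPair {xs : List (Int × Int)} (it : Int × Int)
    (h : xs.Pairwise lexLe) : (insPair xs it).Pairwise lexLe := by
  induction xs with
  | nil => simp [insPair]
  | cons x xs ih =>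
    rcases List.pairwise_cons.mp h with ⟨hx, hxs⟩
    by_cases hlt : lexLt x it
    · simp only [insPair, hlt, if_pos]
      refine List.pairwise_cons.mpr ⟨?_, ih hxs⟩
      intro y hy
      rcases (mem_insPair xs it y).mp hy with rfl | hy
      · exact lexLe_of_lt hlt
      · exact hx y hy
    · have hle : lexLe it x := by
        unfold lexLe
        simpa using hlt
      simp only [insPair, hlt, Bool.false_eq_true, if_false]
      refine List.pairwise_cons.mpr ⟨?_, h⟩
      intro y hy
      rcases List.mem_cons.mp hy with rfl | hy
      · exact hle
      · exact lexLe_trans hle (hx y hy)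

theorem foldl_ins_perm {α : Type} (f : α → Int × Int) :
    ∀ (xs : List α) (acc : List (Int × Int)),
      (xs.foldl (fun acc t => insPair acc (f t)) acc).Perm (acc ++ xs.map f) := by
  intro xs
  induction xs with
  | nil => simp
  | cons x xs ih =>
    intro acc
    simp only [List.foldl_cons, List.map_cons]
    refine (ih (insPair acc (f x))).trans ?_
    exact ((insPair_perm acc (f x)).append_right _).trans (List.perm_middle).symm

theorem foldl_ins_pairwise {α : Type} (f : α → Int × Int) :
    ∀ (xs : List α) (acc : List (Int × Int)), acc.Pairwise lexLe →
      (xs.foldl (fun acc t => insPair acc (f t)) acc).Pairwise lexLe := by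
  intro xs
  induction xs with
  | nil => intro acc h; simpa using h
  | cons x xs ih =>
    intro acc h
    exact ih _ (pairwise_insPair (f x) h)

theorem sorted_unique {l1 l2 : List (Int × Int)} (hp : l1.Perm l2)
    (h1 : l1.Pairwise lexLe) (h2 : l2.Pairwise lexLe) : l1 = l2 :=
  List.Perm.eq_of_pairwise (fun _ _ _ _ => lexLe_antisymm) h1 h2 hp

-- ---- the final build restores the labeled queue ----
theorem build_eq {L P : List (Int × Int)}
    (hL : L.Pairwise (fun s t => s.1 < t.1))
    (hperm : P.Perm (L.map (fun t => (-t.2, t.1)))) :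
    buildB P = L.map Prod.snd := by
  unfold buildB
  have hperm2 : (P.foldl (fun acc t => insPair acc (t.2, -t.1)) []).Perm
      (P.map (fun t : Int × Int => (t.2, -t.1))) := by
    simpa using foldl_ins_perm (fun t : Int × Int => (t.2, -t.1)) P []
  have hmapped : ((L.map (fun t : Int × Int => (-t.2, t.1))).map (fun t : Int × Int => (t.2, -t.1))) = L := by
    simp [List.map_map, Function.comp_def]
  have hperm3 : (P.foldl (fun acc t => insPair acc (t.2, -t.1)) []).Perm L := by
    refine hperm2.trans ?_
    refine (hperm.map (fun t : Int × Int => (t.2, -t.1))).trans ?_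
    rw [hmapped]
  have hLsorted : L.Pairwise lexLe := by
    refine hL.imp ?_
    intro a b hab
    rw [lexLe_iff]
    omega
  have := sorted_unique hperm3
      (foldl_ins_pairwise (fun t : Int × Int => (t.2, -t.1)) P [] (by simp)) hLsorted
  rw [this]

-- ---- findAdj characterizations ----
theorem findAdj_none : ∀ (P : List (Int × Int)), (P.map Prod.fst).Nodup → findAdj P = none
  | [], _ => rfl
  | [_], _ => rfl
  | x :: y :: xs, h => by
    rw [List.map_cons] at h
    rcases List.nodup_cons.mp h with ⟨hx, h2⟩
    have hne : (x.1 == y.1) = false := by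
      simp only [beq_eq_false_iff_ne, ne_eq]
      intro e
      exact hx (by simp [List.map_cons, e])
    have ih := findAdj_none (y :: xs) h2
    simp [findAdj, hne, ih]

theorem findAdj_split (x y : Int × Int) (V : List (Int × Int)) :
    ∀ (U : List (Int × Int)), x.1 = y.1 →
    List.IsChain (fun a b : Int × Int => a.1 ≠ b.1) (U ++ [x]) →
    findAdj (U ++ x :: y :: V) = some U.length
  | [], hxy, _ => by
    simp [findAdj, hxy]
  | u :: U, hxy, hch => by
    have hch' : List.IsChain (fun a b : Int × Int => a.1 ≠ b.1) (u :: (U ++ [x])) := hch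
    rcases U with _ | ⟨u2, U'⟩
    · have hne : (u.1 == x.1) = false := by
        have h' : u.1 ≠ x.1 := by simpa using hch'
        simpa using h'
      show findAdj (u :: x :: y :: V) = some 1
      rw [show findAdj (u :: x :: y :: V)
            = if (u.1 == x.1) = true then some 0
              else (findAdj (x :: y :: V)).map (· + 1) from rfl]
      rw [if_neg (by simp [hne]),
          show findAdj (x :: y :: V)
            = if (x.1 == y.1) = true then some 0
              else (findAdj (y :: V)).map (· + 1) from rfl,
          if_pos (by simp [hxy])]
      rfl
    · have hcc := List.isChain_cons_cons.mp hch'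
      have hne : (u.1 == u2.1) = false := by simpa using hcc.1
      have ih := findAdj_split x y V (u2 :: U') hxy hcc.2
      simp only [List.cons_append] at ih ⊢
      rw [show findAdj (u :: u2 :: (U' ++ x :: y :: V))
            = if (u.1 == u2.1) = true then some 0
              else (findAdj (u2 :: (U' ++ x :: y :: V))).map (· + 1) from rfl]
      rw [if_neg (by simp [hne]), ih]
      simp

-- ---- locating the first adjacent equal pair in a sorted pair list ----
theorem sorted_locate (c s1 s2 : Int) :
    ∀ (P : List (Int × Int)),
    P.Pairwise lexLe → (P.map Prod.snd).Nodup →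
    (c, s1) ∈ P → (c, s2) ∈ P → s1 < s2 →
    (∀ t ∈ P, t.1 = c → s1 ≤ t.2) →
    (∀ t ∈ P, t.1 = c → t.2 ≠ s1 → s2 ≤ t.2) →
    (∀ a ∈ P, ∀ b ∈ P, a ≠ b → a.1 = b.1 → c ≤ a.1) →
    ∃ U V, P = U ++ (c, s1) :: (c, s2) :: V ∧
      List.IsChain (fun a b : Int × Int => a.1 ≠ b.1) (U ++ [(c, s1)]) := by
  intro P
  induction P with
  | nil => intro _ _ h1; cases h1
  | cons t P' ih =>
    intro hsort hnd h1 h2 hlt hmin1 hmin2 hdup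
    rcases List.pairwise_cons.mp hsort with ⟨hhead, hsort'⟩
    rw [List.map_cons] at hnd
    rcases List.nodup_cons.mp hnd with ⟨ht2, hnd'⟩
    by_cases hts : t = (c, s1)
    · subst hts
      -- head is (c, s1); the next element must be (c, s2)
      have h2' : (c, s2) ∈ P' := by
        rcases List.mem_cons.mp h2 with h | h
        · exact absurd (congrArg Prod.snd h).symm (by intro e; exact absurd e (by omega))
        · exact h
      rcases P' with _ | ⟨t2, P''⟩
      · cases h2'
      · have hle2 : lexLe t2 (c, s2) := by
          rcases List.mem_cons.mp h2' with h | h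
          · rw [h]; exact lexLe_refl _
          · exact (List.pairwise_cons.mp hsort').1 _ h
        have ht2c : t2.1 = c := by
          have hle1 := (lexLe_iff _ _).mp (hhead t2 List.mem_cons_self)
          have hle2' := (lexLe_iff _ _).mp hle2
          omega
        have ht2s : t2.2 = s2 := by
          have hne1 : t2.2 ≠ s1 := by
            intro e
            apply ht2
            rw [List.map_cons, show (c, s1).2 = s1 from rfl, ← e]
            exact List.mem_cons_self
          have hge : s2 ≤ t2.2 := hmin2 t2 (List.mem_cons.mpr (Or.inr List.mem_cons_self)) ht2c hne1
          have hle : t2.2 ≤ s2 := by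
            have hle2' := (lexLe_iff _ _).mp hle2
            omega
          omega
        have : t2 = (c, s2) := by
          rw [← ht2c, ← ht2s]
        exact ⟨[], P'', by simp [this], by simp⟩
    · -- head is strictly below c in the lex order: recurse
      have h1' : (c, s1) ∈ P' := by
        rcases List.mem_cons.mp h1 with h | h
        · exact absurd h.symm hts
        · exact h
      have htc : t.1 < c := by
        rcases (lexLe_iff _ _).mp (hhead _ h1') with h | h
        · exact h
        · exfalso
          have hmm := hmin1 t List.mem_cons_self h.1
          have hts2 : t.2 = s1 := by
            have := h.2
            omega
          exact hts (Prod.ext h.1 hts2)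
      have h2' : (c, s2) ∈ P' := by
        rcases List.mem_cons.mp h2 with h | h
        · exact absurd (congrArg Prod.fst h).symm (by intro e; exact absurd e (by omega))
        · exact h
      obtain ⟨U, V, hPeq, hchain⟩ := ih hsort' hnd' h1' h2' hlt
        (fun t' ht' hc => hmin1 t' (List.mem_cons.mpr (Or.inr ht')) hc)
        (fun t' ht' hc hn => hmin2 t' (List.mem_cons.mpr (Or.inr ht')) hc hn)
        (fun a ha b hb hne heq => hdup a (List.mem_cons.mpr (Or.inr ha)) b (List.mem_cons.mpr (Or.inr hb)) hne heq)
      refine ⟨t :: U, V, by rw [hPeq, List.cons_append], ?_⟩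
      rcases U with _ | ⟨u, U'⟩
      · refine List.isChain_cons_cons.mpr ⟨by intro e; exact absurd e (by omega), by simp⟩
      · refine List.isChain_cons_cons.mpr ⟨?_, by simpa using hchain⟩
        have hu : u ∈ P' := by rw [hPeq]; exact List.mem_cons_self
        have htu : t ≠ u := by
          intro e
          exact ht2 (by rw [e]; exact List.mem_map_of_mem hu)
        intro e
        have := hdup t List.mem_cons_self u (List.mem_cons.mpr (Or.inr hu)) htu e
        omega

-- two distinct elements satisfying p give countP ≥ 2
theorem countP_two {α : Type} (p : α → Bool) :
    ∀ (l : List α) (x y : α), l.Nodup → x ∈ l → y ∈ l → x ≠ y → p x → p y →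
    2 ≤ l.countP p := by
  intro l
  induction l with
  | nil => intro x y _ hx _ _ _ _; cases hx
  | cons z l ih =>
    intro x y hnd hx hy hxy hpx hpy
    rcases List.nodup_cons.mp hnd with ⟨hz, hnd'⟩
    rw [List.countP_cons]
    by_cases hzx : z = x
    · subst hzx
      have hy' : y ∈ l := by
        rcases List.mem_cons.mp hy with h | h
        · exact absurd h.symm hxy
        · exact h
      have : 0 < l.countP p := List.countP_pos_iff.mpr ⟨y, hy', hpy⟩
      simp only [hpx, if_pos]
      omega
    · by_cases hzy : z = y
      · subst hzy
        have hx' : x ∈ l := by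
          rcases List.mem_cons.mp hx with h | h
          · exact absurd h hxy
          · exact h
        have : 0 < l.countP p := List.countP_pos_iff.mpr ⟨x, hx', hpx⟩
        simp only [hpy, if_pos]
        omega
      · have hx' : x ∈ l := by
          rcases List.mem_cons.mp hx with h | h
          · exact absurd h.symm hzx
          · exact h
        have hy' : y ∈ l := by
          rcases List.mem_cons.mp hy with h | h
          · exact absurd h.symm hzy
          · exact h
        have := ih x y hnd' hx' hy' hxy hpx hpy
        omega

-- ---- A-side lemmas (find over reverse-sorted keys, queue surgery) ----
theorem find_desc_isMax {l : List Int} {p : Int → Bool} {m : Int}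
    (hs : l.Pairwise (fun a b : Int => b ≤ a)) (h : l.find? p = some m) :
    ∀ x ∈ l, p x = true → x ≤ m := by
  induction l with
  | nil => simp at h
  | cons y t ih =>
    rw [List.find?_cons] at h
    rcases List.pairwise_cons.mp hs with ⟨hy, ht⟩
    intro x hx hpx
    cases hpy : p y with
    | true =>
      rw [hpy] at h
      simp only [Option.some.injEq] at h
      subst h
      rcases List.mem_cons.mp hx with hx | hx
      · exact le_of_eq hx
      · exact hy x hx
    | false =>
      rw [hpy] at h
      rcases List.mem_cons.mp hx with hx | hx
      · subst hx; rw [hpx] at hpy; cases hpy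
      · exact ih ht h x hx hpx

theorem mem_first_split : ∀ {t : List Int} {m : Int}, m ∈ t → ∃ b c, t = b ++ m :: c ∧ m ∉ b := by
  intro t
  induction t with
  | nil => simp
  | cons y s ih =>
    intro m hm
    by_cases hy : y = m
    · exact ⟨[], s, by simp [hy], by simp⟩
    · obtain ⟨b, c, rfl, hb⟩ := ih (by
        rcases List.mem_cons.mp hm with h | h
        · exact absurd h.symm hy
        · exact h)
      exact ⟨y :: b, c, by simp, by
        simp only [List.mem_cons, not_or]
        exact ⟨fun h => hy h.symm, hb⟩⟩

-- Splitting a list at its first two occurrences of m.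
theorem mem_two_split {q : List Int} {m : Int} (h : 2 ≤ q.count m) :
    ∃ a b c, q = a ++ m :: b ++ m :: c ∧ m ∉ a ∧ m ∉ b := by
  induction q with
  | nil => simp at h
  | cons x t ih =>
    by_cases hx : x = m
    · subst hx
      rw [List.count_cons_self] at h
      have hpos : 0 < t.count x := by omega
      obtain ⟨b, c, rfl, hb⟩ := mem_first_split (List.count_pos_iff.mp hpos)
      exact ⟨[], b, c, by simp, by simp, hb⟩
    · have h' : 2 ≤ t.count m := by simpa [List.count_cons, hx] using h
      obtain ⟨a, b, c, rfl, ha, hb⟩ := ih h'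
      exact ⟨x :: a, b, c, by simp, by
        simp only [List.mem_cons, not_or]
        exact ⟨fun h => hx h.symm, ha⟩, hb⟩

theorem enum_find_none (xs : List Int) (s m : Int) (g : Int × Int → Bool)
    (hm : m ∉ xs) (hg : ∀ p, g p = true → p.2 = m) :
    (PySem.List.enumerate xs s).find? g = none := by
  rw [List.find?_eq_none]
  intro p hp hgp
  obtain ⟨k, hk, rfl⟩ := (PySem.List.mem_enumerate_iff xs s p).mp hp
  exact hm (by rw [← hg _ hgp]; exact List.getElem_mem hk)

theorem enum_find_first (a r : List Int) (m : Int) (ha : m ∉ a) :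
    (PySem.List.enumerate (a ++ m :: r) 0).find? (fun p => p.2 == m)
      = some ((a.length : Int), m) := by
  rw [PySem.List.enumerate_append, List.find?_append,
      enum_find_none a 0 m _ ha (fun p hp => by simpa using hp),
      PySem.List.enumerate_cons, List.find?_cons_of_pos (by simp)]
  simp

theorem enum_find_second (a b c : List Int) (m : Int) (ha : m ∉ a) (hb : m ∉ b) :
    (PySem.List.enumerate (a ++ m :: b ++ m :: c) 0).find?
        (fun p => p.2 == m && !(p.1 == (a.length : Int)))
      = some ((a.length : Int) + 1 + (b.length : Int), m) := by
  rw [show a ++ m :: b ++ m :: c = a ++ m :: (b ++ m :: c) by simp]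
  rw [PySem.List.enumerate_append, List.find?_append,
      enum_find_none a 0 m _ ha (fun p hp => by
        have := (Bool.and_eq_true _ _).mp hp
        simpa using this.1),
      PySem.List.enumerate_cons,
      List.find?_cons_of_neg (by simp),
      PySem.List.enumerate_append, List.find?_append,
      enum_find_none b _ m _ hb (fun p hp => by
        have := (Bool.and_eq_true _ _).mp hp
        simpa using this.1),
      PySem.List.enumerate_cons,
      List.find?_cons_of_pos (by simp; omega)]
  simp

theorem find?_filter_ne (l : List (Int × Int)) (k m : Int) (hk : k ≠ m) :
    (l.filter (fun p => !(p.1 == m))).find? (fun p => p.1 == k)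
      = l.find? (fun p => p.1 == k) := by
  induction l with
  | nil => rfl
  | cons x t ih =>
    by_cases hxm : x.1 = m
    · rw [List.filter_cons_of_neg (by simp [hxm]),
          List.find?_cons_of_neg (by simp [hxm]; exact fun h => hk h.symm)]
      exact ih
    · rw [List.filter_cons_of_pos (by simp [hxm])]
      by_cases hxk : x.1 = k
      · rw [List.find?_cons_of_pos (by simp [hxk]), List.find?_cons_of_pos (by simp [hxk])]
      · rw [List.find?_cons_of_neg (by simp [hxk]), List.find?_cons_of_neg (by simp [hxk])]
        exact ih

-- PySem has no erase lemmas; these three are proved from Dict.erase's definition (items.filter).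
theorem getD_erase (d : PySem.Dict Int Int) (m k : Int) :
    (d.erase m).getD k 0 = if k = m then 0 else d.getD k 0 := by
  by_cases hk : k = m
  · subst hk
    rw [if_pos rfl]
    have : (d.erase k).get? k = none := by
      simp only [PySem.Dict.erase, PySem.Dict.get?]
      rw [List.find?_eq_none.mpr]
      · rfl
      · intro p hp
        rcases List.mem_filter.mp hp with ⟨_, hpk⟩
        simpa using hpk
    rw [PySem.Dict.getD_eq_get?_getD, this]; rfl
  · rw [if_neg hk]
    simp only [PySem.Dict.erase, PySem.Dict.getD, PySem.Dict.get?]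
    rw [find?_filter_ne _ _ _ hk]

theorem mem_keys_erase_of (d : PySem.Dict Int Int) (m k : Int)
    (h : k ∈ d.keys) (hk : k ≠ m) : k ∈ (d.erase m).keys := by
  simp only [PySem.Dict.keys, PySem.Dict.erase, List.mem_map] at h ⊢
  obtain ⟨p, hp, rfl⟩ := h
  exact ⟨p, List.mem_filter.mpr ⟨hp, by simpa using hk⟩, rfl⟩

theorem nodup_keys_erase (d : PySem.Dict Int Int) (m : Int)
    (h : d.keys.Nodup) : (d.erase m).keys.Nodup := by
  simp only [PySem.Dict.keys, PySem.Dict.erase] at h ⊢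
  exact h.sublist (List.Sublist.map _ List.filter_sublist)

theorem nodup_keys_modify (d : PySem.Dict Int Int) (k : Int) (f : Int → Int)
    (h : d.keys.Nodup) : (d.modify k 0 f).keys.Nodup := by
  have := PySem.Dict.nodup_keys_foldl_modify_key [k] (fun x => x) (0 : Int)
      (fun _ _ => f) d h
  simpa using this

theorem mem_keys_modify (d : PySem.Dict Int Int) (k k' : Int) (f : Int → Int) :
    k' ∈ (d.modify k 0 f).keys ↔ k' = k ∨ k' ∈ d.keys := by
  rw [show (d.modify k 0 f).keys = (d.insert k (f (d.getD k 0))).keys from PySem.Dict.keys_modify d k 0 f]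
  exact PySem.Dict.mem_keys_insert d k k' (f (d.getD k 0))

-- A's tombstone-then-rebuild step, as one list identity.
theorem newlist_A (a b c : List Int) (m v : Int) :
    ((((a ++ m :: b ++ m :: c).map some).set a.length none).set (a.length + 1 + b.length) (some v)).filterMap id
      = a ++ b ++ v :: c := by
  have h1 : ((a ++ m :: b ++ m :: c).map some).set a.length none
      = a.map some ++ none :: (b.map some ++ some m :: c.map some) := by
    simp
  rw [h1]
  have h2 : (a.map some ++ none :: (b.map some ++ some m :: c.map some)).set (a.length + 1 + b.length) (some v)
      = a.map some ++ none :: (b.map some ++ some v :: c.map some) := by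
    rw [show a.map some ++ none :: (b.map some ++ some m :: c.map some)
        = (a.map some ++ none :: b.map some) ++ some m :: c.map some by simp]
    rw [show a.length + 1 + b.length = (a.map some ++ none :: b.map some).length by simp; omega]
    simp
  rw [h2]
  simp

-- the labeled-queue split matching a value split of the queue
theorem label_split {L : List (Int × Int)} {a b c : List Int} {m : Int}
    (h : L.map Prod.snd = a ++ m :: b ++ m :: c) :
    ∃ A' p1 B' p2 C', L = A' ++ (p1, m) :: B' ++ (p2, m) :: C' ∧
      A'.map Prod.snd = a ∧ B'.map Prod.snd = b ∧ C'.map Prod.snd = c := by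
  rw [show a ++ m :: b ++ m :: c = a ++ m :: (b ++ m :: c) by simp] at h
  rcases List.map_eq_append_iff.mp h with ⟨A', L2, rfl, hA, h2⟩
  rcases List.map_eq_cons_iff.mp h2 with ⟨e1, L3, rfl, he1, h3⟩
  rcases List.map_eq_append_iff.mp h3 with ⟨B', L4, rfl, hB, h4⟩
  rcases List.map_eq_cons_iff.mp h4 with ⟨e2, C', rfl, he2, hC⟩
  refine ⟨A', e1.1, B', e2.1, C', ?_, hA, hB, hC⟩
  rw [show ((e1.1 : Int), m) = e1 by rw [← he1],
      show ((e2.1 : Int), m) = e2 by rw [← he2]]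
  simp

theorem getD_mid (U R : List (Int × Int)) (x : Int × Int) (d : Int × Int) :
    (U ++ x :: R).getD U.length d = x := by
  simp [List.getD_eq_getElem?_getD]

theorem getD_mid1 (U R : List (Int × Int)) (x y : Int × Int) (d : Int × Int) :
    (U ++ x :: y :: R).getD (U.length + 1) d = y := by
  simp [List.getD_eq_getElem?_getD]

theorem drop_two (U V : List (Int × Int)) (x y : Int × Int) :
    (U ++ x :: y :: V).drop (U.length + 2) = V := by
  rw [List.drop_append]; simp

-- ---- the simulation ----
theorem loops_eq (fuel : Nat) : ∀ (q : List Int) (d : PySem.Dict Int Int)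
    (L P : List (Int × Int)),
    (∀ k, d.getD k 0 = (q.count k : Int)) →
    (∀ k, k ∈ q → k ∈ d.keys) →
    d.keys.Nodup →
    L.map Prod.snd = q →
    L.Pairwise (fun s t => s.1 < t.1) →
    P.Pairwise lexLe →
    P.Perm (L.map (fun t => (-t.2, t.1))) →
    updLoopA fuel q d = buildB (updLoopB fuel P) := by
  induction fuel with
  | zero =>
    intro q d L P hcnt hkeys hnd hLs hLf hPs hPp
    rw [updLoopA, updLoopB, build_eq hLf hPp, hLs]
  | succ fuel ih =>
    intro q d L P hcnt hkeys hnd hLs hLf hPs hPp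
    have hndP : (P.map Prod.snd).Nodup := by
      have h1 : (P.map Prod.snd).Perm ((L.map (fun t : Int × Int => (-t.2, t.1))).map Prod.snd) :=
        hPp.map _
      have h2 : ((L.map (fun t : Int × Int => (-t.2, t.1))).map Prod.snd) = L.map Prod.fst := by
        simp [List.map_map, Function.comp_def]
      have h3 : (L.map Prod.fst).Nodup :=
        ((List.pairwise_map.mpr hLf).imp (fun h => ne_of_lt h) : _)
      exact ((h1.trans (by rw [h2])).symm).nodup h3
    rw [updLoopA, updLoopB]
    cases hfA : (PySem.List.sorted d.keys (fun k => k) true).find? (fun k => decide (1 < d.getD k 0)) with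
    | none =>
      have hcle : ∀ x : Int, q.count x ≤ 1 := by
        intro x
        by_cases hxq : x ∈ q
        · have hmem := (PySem.List.mem_sorted d.keys (fun k => k) true x).mpr (hkeys x hxq)
          have hno := List.find?_eq_none.mp hfA x hmem
          simp only [decide_eq_true_eq] at hno
          have hc := hcnt x
          omega
        · simp [List.count_eq_zero_of_not_mem hxq]
      have hqnd : q.Nodup := List.nodup_iff_count_le_one.mpr hcle
      have hfad : findAdj P = none := by
        apply findAdj_none
        have h1 : (P.map Prod.fst).Perm ((L.map (fun t : Int × Int => (-t.2, t.1))).map Prod.fst) :=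
          hPp.map _
        have h2 : ((L.map (fun t : Int × Int => (-t.2, t.1))).map Prod.fst) = q.map (fun v => -v) := by
          rw [← hLs]
          simp [List.map_map, Function.comp_def]
        have h3 : (q.map (fun v : Int => -v)).Nodup := hqnd.map neg_injective
        have hp : (P.map Prod.fst).Perm (q.map (fun v => -v)) := by rw [← h2]; exact h1
        exact hp.symm.nodup h3
      rw [hfad]
      rw [if_pos (by decide), build_eq hLf hPp, hLs]
    | some m =>
      have hpm : (1 : Int) < d.getD m 0 := by simpa using List.find?_some hfA
      have hcount : 2 ≤ q.count m := by have := hcnt m; omega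
      have hmax : ∀ x : Int, 2 ≤ q.count x → x ≤ m := by
        intro x hx
        have hxq : x ∈ q := List.count_pos_iff.mp (by omega)
        refine find_desc_isMax (PySem.List.sorted_pairwise_rev d.keys (fun k => k)) hfA x
          ((PySem.List.mem_sorted d.keys (fun k => k) true x).mpr (hkeys x hxq)) ?_
        simp only [decide_eq_true_eq]
        have := hcnt x
        omega
      obtain ⟨a, b, c, hq, ha, hb⟩ := mem_two_split hcount
      obtain ⟨A', p1, B', p2, C', hLeq, hA, hB, hC⟩ := label_split (hLs.trans hq)
      have hpw := hLf
      rw [hLeq] at hpw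
      rcases List.pairwise_append.mp hpw with ⟨hpwL, hpwR, hcrossLR⟩
      rcases List.pairwise_append.mp hpwL with ⟨hpwA, hpwM, hcrossAM⟩
      rcases List.pairwise_cons.mp hpwM with ⟨hp1ltB, hpwB⟩
      rcases List.pairwise_cons.mp hpwR with ⟨hp2lt, hpwC⟩
      have hp12 : p1 < p2 := hcrossLR ((p1 : Int), m) (by simp) ((p2 : Int), m) (by simp)
      have hmemL1 : ((p1 : Int), m) ∈ L := by rw [hLeq]; simp
      have hmemL2 : ((p2 : Int), m) ∈ L := by rw [hLeq]; simp
      have hmem1 : ((-m : Int), p1) ∈ P := hPp.mem_iff.mpr (by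
        simpa using List.mem_map_of_mem (f := fun t : Int × Int => (-t.2, t.1)) hmemL1)
      have hmem2 : ((-m : Int), p2) ∈ P := hPp.mem_iff.mpr (by
        simpa using List.mem_map_of_mem (f := fun t : Int × Int => (-t.2, t.1)) hmemL2)
      have hmemL : ∀ s : Int, ((s : Int), m) ∈ L → s = p1 ∨ s = p2 ∨ p2 < s := by
        intro s hs
        rw [hLeq] at hs
        rcases List.mem_append.mp hs with h | h
        · rcases List.mem_append.mp h with h | h
          · exact absurd (hA ▸ List.mem_map_of_mem (f := Prod.snd) h) ha
          · rcases List.mem_cons.mp h with h | h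
            · exact Or.inl (congrArg Prod.fst h)
            · exact absurd (hB ▸ List.mem_map_of_mem (f := Prod.snd) h) hb
        · rcases List.mem_cons.mp h with h | h
          · exact Or.inr (Or.inl (congrArg Prod.fst h))
          · exact Or.inr (Or.inr (hp2lt _ h))
      have hminP : ∀ t ∈ P, t.1 = -m → (p1 ≤ t.2 ∧ (t.2 ≠ p1 → p2 ≤ t.2)) := by
        intro t ht htc
        have hmem : t ∈ L.map (fun t : Int × Int => (-t.2, t.1)) := hPp.mem_iff.mp ht
        rcases List.mem_map.mp hmem with ⟨u, hu, hut⟩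
        have hu2 : u.2 = m := by
          have h1 := congrArg Prod.fst hut
          omega
        have hts : t.2 = u.1 := (congrArg Prod.snd hut).symm
        have humem : ((u.1 : Int), m) ∈ L := by
          have he : u = (u.1, m) := Prod.ext rfl hu2
          rw [← he]
          exact hu
        rcases hmemL u.1 humem with h | h | h
        · constructor
          · omega
          · intro hne
            exact absurd (by omega) hne
        · constructor <;> intros <;> omega
        · constructor <;> intros <;> omega
      have hdupP : ∀ x ∈ P, ∀ y ∈ P, x ≠ y → x.1 = y.1 → -m ≤ x.1 := by
        intro x hx y hy hxy hfst
        have hPnodup : P.Nodup := List.Nodup.of_map Prod.snd hndP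
        have h2c : 2 ≤ P.countP (fun t => t.1 == x.1) :=
          countP_two _ P x y hPnodup hx hy hxy (by simp) (by simp [hfst])
        have htr : P.countP (fun t => t.1 == x.1) = q.count (-x.1) := by
          rw [List.Perm.countP_eq _ hPp, List.countP_map, ← hLs, List.count_eq_countP,
              List.countP_map]
          apply List.countP_congr
          intro u _
          constructor <;> intro h
          · have : -u.2 = x.1 := by simpa using h
            simp only [Function.comp]
            simpa using (by omega : u.2 = -x.1)
          · have : u.2 = -x.1 := by simpa using h
            simp only [Function.comp]
            simpa using (by omega : -u.2 = x.1)
        have := hmax (-x.1) (by omega)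
        omega
      obtain ⟨U, V, hPeq, hchain⟩ := sorted_locate (-m) p1 p2 P hPs hndP hmem1 hmem2 hp12
        (fun t ht hc => (hminP t ht hc).1) (fun t ht hc hn => (hminP t ht hc).2 hn) hdupP
      have hfad : findAdj P = some U.length := by
        rw [hPeq]
        exact findAdj_split _ _ V U rfl hchain
      rw [hfad]
      simp only []
      have hget1 : P.getD U.length (0, 0) = (-m, p1) := by rw [hPeq]; exact getD_mid _ _ _ _
      have hget2 : P.getD (U.length + 1) (0, 0) = (-m, p2) := by rw [hPeq]; exact getD_mid1 _ _ _ _ _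
      rw [hget1, hget2]
      by_cases hm0 : m = 0
      · subst hm0
        rw [if_pos (by simp), if_pos (by simp)]
        rw [build_eq hLf hPp, hLs]
      · have hifA : ¬ ((m == 0) = true) := by simpa using hm0
        have hifB : ¬ ((((-m : Int), p1).1 == 0) = true) := by
          intro e
          have e2 : -m = 0 := beq_iff_eq.mp e
          exact hm0 (by omega)
        rw [if_neg hifA, if_neg hifB]
        -- A side: locate the two occurrences and rebuild the queue
        subst hq
        have hf1 : (PySem.List.enumerate (a ++ m :: b ++ m :: c) 0).find? (fun p => p.2 == m)
            = some ((a.length : Int), m) := by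
          rw [show a ++ m :: b ++ m :: c = a ++ (m :: (b ++ m :: c)) by simp]
          exact enum_find_first a (b ++ m :: c) m ha
        rw [hf1]
        dsimp only
        rw [enum_find_second a b c m ha hb]
        dsimp only
        have ht1 : ((a.length : Int)).toNat = a.length := by simp
        have ht2 : ((a.length : Int) + 1 + (b.length : Int)).toNat = a.length + 1 + b.length := by omega
        rw [ht1, ht2, newlist_A a b c m (PySem.Int.floordiv m 2)]
        -- B side: surgery on the sorted pair list
        rw [hPeq, List.take_left, drop_two]
        generalize hv : PySem.Int.floordiv m 2 = v
        have hmrg : (-(PySem.Int.floordiv (-(-m)) 2), p2) = ((-v : Int), p2) := by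
          rw [neg_neg, hv]
        rw [hmrg]
        -- invariants for the next iteration
        have hUV : (U ++ V).Perm (A'.map (fun t : Int × Int => (-t.2, t.1))
            ++ (B'.map (fun t : Int × Int => (-t.2, t.1)) ++ C'.map (fun t : Int × Int => (-t.2, t.1)))) := by
          have h1 : (((-m : Int), p1) :: ((-m : Int), p2) :: (U ++ V)).Perm P := by
            rw [hPeq]
            refine (List.Perm.cons _ ?_).trans List.perm_middle.symm
            exact List.perm_middle.symm
          have h2 : (L.map (fun t : Int × Int => (-t.2, t.1))).Perm
              (((-m : Int), p1) :: ((-m : Int), p2) :: (A'.map (fun t : Int × Int => (-t.2, t.1))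
                ++ (B'.map (fun t : Int × Int => (-t.2, t.1)) ++ C'.map (fun t : Int × Int => (-t.2, t.1))))) := by
            rw [hLeq]
            simp only [List.map_append, List.map_cons]
            rw [List.append_assoc, List.cons_append]
            refine List.perm_middle.trans ?_
            refine List.Perm.cons _ ?_
            refine (List.Perm.append_left _ (List.perm_middle (l₁ := B'.map (fun t : Int × Int => (-t.2, t.1))))).trans ?_
            exact List.perm_middle
          have h3 := (h1.trans hPp).trans h2
          exact (h3.cons_inv).cons_inv
        -- dict bookkeeping after one merge (A's three modifies and the conditional erase)
        have hcnt3 : ∀ k, (((d.modify m 0 (fun x => x - 1)).modify v 0 (fun x => x + 1)).modify m 0 (fun x => x - 1)).getD k 0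
            = ((a ++ b ++ v :: c).count k : Int) := by
          intro k
          by_cases hkm : k = m
          · subst hkm
            by_cases hkv : k = v
            · subst hkv
              simp [List.count_append, hcnt]
              omega
            · simp [PySem.Dict.getD_modify, List.count_append, List.count_cons, hcnt, hkv]
              omega
          · by_cases hkv : k = v
            · subst hkv
              simp [PySem.Dict.getD_modify, List.count_append, List.count_cons, hcnt, hkm]
              omega
            · have hmk : ¬m = k := fun h => hkm h.symm
              have hvk : ¬v = k := fun h => hkv h.symm
              simp [PySem.Dict.getD_modify, List.count_append, hcnt, hkm, hkv, hmk, hvk]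
        have hkeys3 : ∀ k, k ∈ a ++ b ++ v :: c → k ∈ (((d.modify m 0 (fun x => x - 1)).modify v 0 (fun x => x + 1)).modify m 0 (fun x => x - 1)).keys := by
          intro k hk
          simp only [mem_keys_modify]
          simp only [List.mem_append, List.mem_cons] at hk
          rcases hk with (hk | hk) | hk | hk
          · exact Or.inr (Or.inr (Or.inr (hkeys k (by simp [hk]))))
          · exact Or.inr (Or.inr (Or.inr (hkeys k (by simp [hk]))))
          · exact Or.inr (Or.inl hk)
          · exact Or.inr (Or.inr (Or.inr (hkeys k (by simp [hk]))))
        have hnd3 : (((d.modify m 0 (fun x => x - 1)).modify v 0 (fun x => x + 1)).modify m 0 (fun x => x - 1)).keys.Nodup :=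
          nodup_keys_modify _ _ _ (nodup_keys_modify _ _ _ (nodup_keys_modify _ _ _ hnd))
        have hLs' : (A' ++ B' ++ (p2, v) :: C').map Prod.snd = a ++ b ++ v :: c := by
          simp [hA, hB, hC]
        have hPs' : (insPair (U ++ V) ((-v : Int), p2)).Pairwise lexLe :=
          pairwise_insPair _ ((hPeq ▸ hPs).sublist
            (List.Sublist.append_left (List.Sublist.cons _ (List.Sublist.cons _ (List.Sublist.refl _))) U))
        have hPp' : (insPair (U ++ V) ((-v : Int), p2)).Perm
            ((A' ++ B' ++ (p2, v) :: C').map (fun t : Int × Int => (-t.2, t.1))) := by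
          refine (insPair_perm _ _).trans ?_
          simp only [List.map_append, List.map_cons]
          refine (List.Perm.cons _ hUV).trans ?_
          rw [← List.append_assoc]
          exact List.perm_middle.symm
        have hLf' : (A' ++ B' ++ (p2, v) :: C').Pairwise (fun s t => s.1 < t.1) := by
          refine List.pairwise_append.mpr ⟨?_, List.pairwise_cons.mpr ⟨hp2lt, hpwC⟩, ?_⟩
          · refine List.pairwise_append.mpr ⟨hpwA, hpwB, ?_⟩
            intro x hx y hy
            exact hcrossAM x hx y (List.mem_cons.mpr (Or.inr hy))
          · intro x hx y hy
            have hx' : x ∈ A' ++ (p1, m) :: B' := by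
              rcases List.mem_append.mp hx with hx | hx
              · exact List.mem_append.mpr (Or.inl hx)
              · exact List.mem_append.mpr (Or.inr (List.mem_cons.mpr (Or.inr hx)))
            rcases List.mem_cons.mp hy with rfl | hy
            · exact hcrossLR x hx' ((p2 : Int), m) (by simp)
            · exact hcrossLR x hx' y (List.mem_cons.mpr (Or.inr hy))
        by_cases h0 : (((d.modify m 0 (fun x => x - 1)).modify v 0 (fun x => x + 1)).modify m 0 (fun x => x - 1)).getD m 0 = 0
        · rw [if_pos h0]
          apply ih _ _ _ _ _ _ _ hLs' hLf' hPs' hPp'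
          · intro k
            rw [getD_erase]
            split_ifs with hkm
            · subst hkm
              have h1 := hcnt3 k
              rw [h0] at h1
              omega
            · exact hcnt3 k
          · intro k hk
            have hkm : k ≠ m := by
              intro e
              subst e
              have h1 := hcnt3 k
              rw [h0] at h1
              have h2 : List.count k (a ++ b ++ v :: c) = 0 := by exact_mod_cast h1.symm
              exact (List.count_eq_zero.mp h2) hk
            exact mem_keys_erase_of _ _ _ (hkeys3 k hk) hkm
          · exact nodup_keys_erase _ _ hnd3
        · rw [if_neg h0]
          exact ih _ _ _ _ hcnt3 hkeys3 hnd3 hLs' hLf' hPs' hPp' 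

-- ===== VERDICT (by name: the statement is the Claim_ definition above) =====
theorem update_priorities_spec : Claim_equal_update_priorities := by
  intro processes _
  unfold Spec_update_priorities update_priorities update_priorities_alt
  apply loops_eq (processes.length + 1) processes _ (PySem.List.enumerate processes 0)
  · intro k
    rw [PySem.Dict.getD_foldl_modify_add_one]
    simp
  · intro k hk
    rw [PySem.Dict.keys_foldl_modify]
    have : PySem.Set.update (PySem.Dict.empty : PySem.Dict Int Int).keys processes
        = PySem.Set.ofList processes := by
      rw [PySem.Set.ofList_eq_foldl]
      rfl
    rw [this]
    exact (PySem.Set.mem_ofList processes k).mpr hk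
  · exact PySem.Dict.nodup_keys_foldl_modify_key processes (fun x => x) 0
      (fun _ _ => (fun v => v + 1)) PySem.Dict.empty PySem.Dict.nodup_keys_empty
  · exact PySem.List.map_snd_enumerate processes 0
  · exact PySem.List.pairwise_lt_enumerate processes 0
  · exact foldl_ins_pairwise _ _ [] (by simp)
  · simpa using foldl_ins_perm (fun t : Int × Int => (-t.2, t.1)) (PySem.List.enumerate processes 0) []
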